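-- pv_equiv track=rewrite | github.com/godp1301/aoc2022 | day8/tree_house.py | top_neighbors
-- ===== SOURCE A (Python) =====
-- def top_neighbors(forest, x, y):
--     visible = []
--     for t in reversed([forest[i][y] for i in range(0, x)]):
--         if t >= forest[x][y]:
--             visible.append(t)
--             break
--         else:
--             visible.append(t)
--     return visible
-- ===== SOURCE B (Python) =====
-- def top_neighbors(forest, x, y):
--     if x <= 0:
--         return []
--     h = forest[x][y]
--     k = 0
--     for i in range(x):  # forward scan: remember the LAST blocker row
--         if forest[i][y] >= h:
--             k = i
--     return [forest[i][y] for i in range(x - 1, k - 1, -1)]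
-- ===== Notes on version B (the rewrite author's own statement) =====
-- stated objective: alternative
-- what changed: B traverses the column in the opposite direction: a forward pass over rows 0..x-1 records the index of the LAST blocker, and the answer is then generated as a descending-range comprehension from row x-1 down to that blocker; A walks backward appending elements until a break.
import Mathlib
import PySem

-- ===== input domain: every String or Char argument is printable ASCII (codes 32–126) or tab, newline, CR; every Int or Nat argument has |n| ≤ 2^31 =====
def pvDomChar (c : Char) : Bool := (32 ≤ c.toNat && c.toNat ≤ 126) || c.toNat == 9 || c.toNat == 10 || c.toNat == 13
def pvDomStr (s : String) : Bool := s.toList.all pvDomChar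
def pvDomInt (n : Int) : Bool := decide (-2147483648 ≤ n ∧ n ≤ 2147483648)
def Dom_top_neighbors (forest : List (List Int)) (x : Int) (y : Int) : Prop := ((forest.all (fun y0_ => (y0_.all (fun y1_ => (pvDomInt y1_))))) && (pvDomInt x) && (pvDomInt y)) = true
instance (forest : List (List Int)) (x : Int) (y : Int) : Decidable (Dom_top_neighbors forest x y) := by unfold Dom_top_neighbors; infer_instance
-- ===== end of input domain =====

-- B traverses forward recording the last blocker row, then emits a descending-range comprehension; alternative decomposition, same cost.

-- forest[i][y] with Python (negative-wrap) indexing; `none` (IndexError) is excluded by Pre_, so the default is never reached there.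
def pvGet (forest : List (List Int)) (y i : Int) : Int :=
  (((PySem.List.pyGet? forest i).bind (fun r => PySem.List.pyGet? r y)).getD 0)

-- ===== PORT A =====
-- A's for-loop with break: append t; if t >= h stop
def goA (h : Int) : List Int → List Int
  | [] => []
  | t :: rest => if h ≤ t then [t] else t :: goA h rest

def top_neighbors (forest : List (List Int)) (x : Int) (y : Int) : List Int :=
  goA (pvGet forest y x) (((PySem.List.pyRange 0 x 1).map (pvGet forest y)).reverse)

-- ===== PORT B =====
def top_neighbors_alt (forest : List (List Int)) (x : Int) (y : Int) : List Int :=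
  if x ≤ 0 then []
  else
    let h := pvGet forest y x
    let k := (PySem.List.pyRange 0 x 1).foldl
      (fun k i => if h ≤ pvGet forest y i then i else k) 0
    (PySem.List.pyRange (x - 1) (k - 1) (-1)).map (pvGet forest y)

-- ===== PRECONDITION & SPEC =====
-- Pre_: every index A actually touches (rows 0..x-1 and, when the loop runs, row x, each at column y,
-- with Python negative-index wraparound) is in range; A raises IndexError otherwise.
def Pre_top_neighbors (forest : List (List Int)) (x : Int) (y : Int) : Prop :=
  0 < x →
    ((∀ i ∈ PySem.List.pyRange 0 x 1,
        (((PySem.List.pyGet? forest i).bind (fun r => PySem.List.pyGet? r y)).isSome = true)) ∧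
      (((PySem.List.pyGet? forest x).bind (fun r => PySem.List.pyGet? r y)).isSome = true))
instance (forest : List (List Int)) (x : Int) (y : Int) : Decidable (Pre_top_neighbors forest x y) := by
  unfold Pre_top_neighbors; infer_instance

def pvWitness_top_neighbors : List (List Int) × Int × Int := ([[3, 1], [2, 5], [4, 0]], 2, 0)

def Spec_top_neighbors (forest : List (List Int)) (x : Int) (y : Int) (out : List Int) : Prop := out = top_neighbors_alt forest x y
instance (forest : List (List Int)) (x : Int) (y : Int) (out : List Int) : Decidable (Spec_top_neighbors forest x y out) := by unfold Spec_top_neighbors; infer_instance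

-- ===== CLAIM (what is proved, stated in full; the proofs are below) =====
def Claim_equal_top_neighbors : Prop := ∀ (forest : List (List Int)) (x : Int) (y : Int), Dom_top_neighbors forest x y → Pre_top_neighbors forest x y → Spec_top_neighbors forest x y (top_neighbors forest x y)

-- ===== LEMMAS AND PROOFS =====

-- the last-blocker fold of B, as a function of the (Nat) right end
def lastB (g : Int → Int) (h : Int) (n : Nat) : Int :=
  (PySem.List.pyRange 0 n 1).foldl (fun k i => if h ≤ g i then i else k) 0

-- combined invariant: the fold stays in [0, n], and A's break-loop over the reversed
-- column equals the reversed column restricted to rows ≥ the last blocker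
theorem goA_eq_lastB (g : Int → Int) (h : Int) (n : Nat) :
    0 ≤ lastB g h n ∧ lastB g h n ≤ n ∧
      goA h (((PySem.List.pyRange 0 n 1).map g).reverse) =
        ((PySem.List.pyRange (lastB g h n) n 1).map g).reverse := by
  induction n with
  | zero =>
    refine ⟨le_refl 0, le_refl 0, ?_⟩
    simp [lastB, PySem.List.pyRange_one_eq_nil, goA]
  | succ m ih =>
    obtain ⟨h0, hle, hgo⟩ := ih
    have hsplit : PySem.List.pyRange 0 ((m : Int) + 1) 1 =
        PySem.List.pyRange 0 m 1 ++ [(m : Int)] := by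
      have := PySem.List.pyRange_one_succ_right (a := 0) (b := (m : Int)) (by positivity)
      simpa using this
    have hlast : lastB g h (m + 1) = if h ≤ g m then (m : Int) else lastB g h m := by
      simp only [lastB, Nat.cast_add, Nat.cast_one, hsplit, List.foldl_append, List.foldl_cons,
        List.foldl_nil]
    by_cases hb : h ≤ g (m : Int)
    · refine ⟨by simp [hlast, hb], by simp [hlast, hb], ?_⟩
      rw [hlast]
      simp only [hb, if_true, Nat.cast_add, Nat.cast_one, hsplit]
      rw [PySem.List.pyRange_one_singleton (a := (m : Int)) |>.symm] at *
      simp [goA, hb, PySem.List.pyRange_one_singleton]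
    · refine ⟨by simp [hlast, hb, h0], by simp [hlast, hb]; omega, ?_⟩
      rw [hlast]
      simp only [hb, if_false, Nat.cast_add, Nat.cast_one, hsplit]
      have hsplit2 : PySem.List.pyRange (lastB g h m) ((m : Int) + 1) 1 =
          PySem.List.pyRange (lastB g h m) m 1 ++ [(m : Int)] := by
        have := PySem.List.pyRange_one_succ_right (a := lastB g h m) (b := (m : Int))
          (by exact_mod_cast hle)
        simpa using this
      rw [hsplit2]
      simp only [List.map_append, List.map_cons, List.map_nil, List.reverse_append,
        List.reverse_cons, List.reverse_nil, List.nil_append, List.cons_append, goA, hb, if_false]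
      simpa using hgo

-- ===== VERDICT (by name: the statement is the Claim_ definition above) =====
theorem top_neighbors_spec : Claim_equal_top_neighbors := by
  intro forest x y _ _
  unfold Spec_top_neighbors top_neighbors top_neighbors_alt
  by_cases hx : x ≤ 0
  · simp [hx, PySem.List.pyRange_one_eq_nil hx, goA]
  · simp only [hx, if_false]
    have hxnat : x = ((x.toNat : Nat) : Int) := by omega
    obtain ⟨h0, hle, hgo⟩ := goA_eq_lastB (pvGet forest y) (pvGet forest y x) x.toNat
    rw [← hxnat] at hgo
    have hL : (PySem.List.pyRange 0 x 1).foldl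
        (fun k i => if pvGet forest y x ≤ pvGet forest y i then i else k) 0 =
        lastB (pvGet forest y) (pvGet forest y x) x.toNat := by
      unfold lastB; rw [← hxnat]
    rw [hL, PySem.List.pyRange_neg_one_eq_reverse]
    have e1 : lastB (pvGet forest y) (pvGet forest y x) x.toNat - 1 + 1 =
        lastB (pvGet forest y) (pvGet forest y x) x.toNat := by ring
    have e2 : x - 1 + 1 = x := by ring
    rw [e1, e2, List.map_reverse, hgo]
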